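-- pv_equiv track=rewrite | github.com/james5635/GeekForGeek-Data-Structure-and-Algorithm | logic_building/find_recurring_sequence_in_a_fraction/simple_approach.py | find_recurring_sequence
-- ===== SOURCE A (Python) =====
-- def find_recurring_sequence(numerator: int, denominator: int) -> str | None:
--     """
--     >>> find_recurring_sequence(50,22)
--     '27'
--     >>> find_recurring_sequence(10,2) == None
--     True
--     """
--     res = ""
--     map = {}
--     remainder = numerator % denominator
--     while remainder != 0 and remainder not in map:
--         map[remainder] = len(res)
--         remainder = remainder * 10
--         res += str(remainder // denominator)
--         remainder = remainder % denominator
--     if remainder == 0: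
--         return None
--     else:
--         return res[map[remainder] :]
-- ===== SOURCE B (Python) =====
-- def find_recurring_sequence(numerator: int, denominator: int) -> str | None:
--     # Phase 1: long division keeping only the set of seen remainders;
--     # stop at the first remainder that repeats (or report None on exact division).
--     seen = set()
--     r = numerator % denominator
--     while r != 0 and r not in seen:
--         seen.add(r)
--         r = r * 10 % denominator
--     if r == 0:
--         return None
--     # Phase 2: restart long division from the repeating remainder and collect
--     # digits until that remainder comes round again.
--     start = r
--     digits = []
--     while True:
--         r = r * 10
--         digits.append(str(r // denominator))
--         r = r % denominator
--         if r == start: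
--             break
--     return "".join(digits)
-- ===== Notes on version B (the rewrite author's own statement) =====
-- stated objective: alternative
-- what changed: A runs one long division keeping a dict from remainder to digit position and slices the digit string from the repeated remainder's stored position; B keeps only a set of seen remainders to find the repeating remainder, then re-runs the long division from that remainder, collecting digits until it comes round again.
import Mathlib
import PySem

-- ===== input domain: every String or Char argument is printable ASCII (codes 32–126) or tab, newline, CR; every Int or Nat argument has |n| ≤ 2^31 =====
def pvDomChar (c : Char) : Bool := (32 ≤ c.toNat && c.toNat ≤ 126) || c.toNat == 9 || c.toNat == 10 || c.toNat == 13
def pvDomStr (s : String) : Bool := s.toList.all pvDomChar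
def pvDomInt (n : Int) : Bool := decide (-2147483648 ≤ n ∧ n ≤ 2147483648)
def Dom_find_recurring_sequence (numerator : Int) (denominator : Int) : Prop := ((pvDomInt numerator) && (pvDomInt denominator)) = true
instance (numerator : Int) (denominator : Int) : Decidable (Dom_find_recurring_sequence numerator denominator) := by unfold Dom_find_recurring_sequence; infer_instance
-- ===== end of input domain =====

-- B re-derives the recurring block in two phases (set-only cycle detection, then a second
-- long division from the repeating remainder) instead of A's position dict plus slice;
-- objective: alternative decomposition, same asymptotic cost.

-- ===== PORT A =====
-- Strings are handled as their List Char code points (PySem.Chars is exact there);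
-- the final value is rebuilt with String.ofList.
-- The while loop is ported with fuel natAbs denominator + 1: every iteration inserts a
-- fresh key into the dict and all keys are distinct nonzero remainders mod denominator,
-- so the fuel-0 branch is unreachable (this is what the equivalence proof establishes).
def pvExitA (d : Int) (r : Int) (m : PySem.Dict Int Int) (s : List Char) : Option String :=
  if r = 0 then none
  else some (String.ofList (PySem.List.slice s (some (m.getD r 0)) none))

def pvGoA (d : Int) : Nat → Int → PySem.Dict Int Int → List Char → Option String
  | 0, r, m, s => pvExitA d r m s
  | f+1, r, m, s =>
    if r ≠ 0 ∧ m.contains r = false then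
      pvGoA d f (PySem.Int.mod (r * 10) d)
        (m.insert r (PySem.List.len s))
        (s ++ PySem.Int.toChars (PySem.Int.floordiv (r * 10) d))
    else pvExitA d r m s

def find_recurring_sequence (numerator : Int) (denominator : Int) : Option String :=
  pvGoA denominator (denominator.natAbs + 1)
    (PySem.Int.mod numerator denominator) PySem.Dict.empty []

-- ===== PORT B =====
-- Phase 1: long division keeping only the set of seen remainders; returns the first
-- remainder that repeats (or 0 on exact division).  Same fuel discipline as port A.
def pvGoB1 (d : Int) : Nat → Int → PySem.Set Int → Int
  | 0, r, _ => r
  | f+1, r, seen =>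
    if r ≠ 0 ∧ seen.contains r = false then
      pvGoB1 d f (PySem.Int.mod (r * 10) d) (seen.add r)
    else r

-- Phase 2: restart long division from the repeating remainder, collecting digit strings
-- until that remainder comes round again (a do-while, hence the check after the append).
def pvGoB2 (d : Int) (start : Int) : Nat → Int → List (List Char) → List (List Char)
  | 0, _, acc => acc
  | f+1, r, acc =>
    let r1 := r * 10
    let acc1 := acc ++ [PySem.Int.toChars (PySem.Int.floordiv r1 d)]
    let r2 := PySem.Int.mod r1 d
    if r2 = start then acc1 else pvGoB2 d start f r2 acc1

def find_recurring_sequence_alt (numerator : Int) (denominator : Int) : Option String :=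
  let r := PySem.Int.mod numerator denominator
  let rr := pvGoB1 denominator (denominator.natAbs + 1) r PySem.Set.empty
  if rr = 0 then none
  else some (String.ofList (PySem.Chars.join []
    (pvGoB2 denominator rr (denominator.natAbs + 1) rr [])))

-- ===== PRECONDITION & SPEC =====
-- Python A raises ZeroDivisionError on denominator = 0 (numerator % 0); that is all
-- Pre_ excludes.
def Pre_find_recurring_sequence (numerator : Int) (denominator : Int) : Prop :=
  denominator ≠ 0
instance (numerator : Int) (denominator : Int) : Decidable (Pre_find_recurring_sequence numerator denominator) := by unfold Pre_find_recurring_sequence; infer_instance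

def pvWitness_find_recurring_sequence : Int × Int := (50, 22)

def Spec_find_recurring_sequence (numerator : Int) (denominator : Int) (out : Option String) : Prop := out = find_recurring_sequence_alt numerator denominator
instance (numerator : Int) (denominator : Int) (out : Option String) : Decidable (Spec_find_recurring_sequence numerator denominator out) := by unfold Spec_find_recurring_sequence; infer_instance

-- ===== CLAIM (what is proved, stated in full; the proofs are below) =====
def Claim_equal_find_recurring_sequence : Prop := ∀ (numerator : Int) (denominator : Int), Dom_find_recurring_sequence numerator denominator → Pre_find_recurring_sequence numerator denominator → Spec_find_recurring_sequence numerator denominator (find_recurring_sequence numerator denominator)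

-- ===== LEMMAS AND PROOFS =====

-- The one-step map of the long division and its orbit from the initial remainder.
def pvN (d : Int) (r : Int) : Int := PySem.Int.mod (r * 10) d
def pvOrb (d r0 : Int) (i : Nat) : Int := (pvN d)^[i] r0

-- the loop's stopping condition after n steps
def pvStop (d r0 : Int) (n : Nat) : Prop :=
  pvOrb d r0 n = 0 ∨ ∃ j, j < n ∧ pvOrb d r0 j = pvOrb d r0 n

-- remainder range (sign of the divisor)
def pvInR (d r : Int) : Prop := if 0 < d then 0 ≤ r ∧ r < d else d < r ∧ r ≤ 0

-- digit emitted at step t, and the concatenation of the first i digits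
def pvDig (d r0 : Int) (t : Nat) : List Char :=
  PySem.Int.toChars (PySem.Int.floordiv (pvOrb d r0 t * 10) d)
def pvDigs (d r0 : Int) (i : Nat) : List Char := (List.range i).flatMap (pvDig d r0)

theorem pvOrb_succ (d r0 : Int) (i : Nat) :
    pvOrb d r0 (i+1) = PySem.Int.mod (pvOrb d r0 i * 10) d := by
  simp [pvOrb, Function.iterate_succ_apply', pvN]

theorem pvInR_mod {d : Int} (hd : d ≠ 0) (a : Int) : pvInR d (PySem.Int.mod a d) := by
  unfold pvInR
  rcases lt_or_gt_of_ne hd with h | h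
  · simp only [if_neg (not_lt.mpr h.le)]
    exact PySem.Int.mod_neg_bounds a h
  · simp only [if_pos h]
    exact ⟨PySem.Int.mod_nonneg a h, PySem.Int.mod_lt a h⟩

theorem pvInR_orb {d r0 : Int} (hd : d ≠ 0) (hr0 : pvInR d r0) (i : Nat) :
    pvInR d (pvOrb d r0 i) := by
  induction i with
  | zero => exact hr0
  | succ i _ => rw [pvOrb_succ]; exact pvInR_mod hd _

theorem pvDigit_bounds {d r : Int} (hd : d ≠ 0) (hr : pvInR d r) :
    0 ≤ PySem.Int.floordiv (r * 10) d ∧ PySem.Int.floordiv (r * 10) d < 10 := by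
  unfold pvInR at hr
  rcases lt_or_gt_of_ne hd with h | h
  · rw [if_neg (not_lt.mpr h.le)] at hr
    rw [← PySem.Int.floordiv_neg_neg]
    constructor
    · rw [PySem.Int.le_floordiv_iff_mul_le (by omega : (0:Int) < -d)]; nlinarith [hr.1, hr.2]
    · rw [PySem.Int.floordiv_lt_iff_lt_mul (by omega : (0:Int) < -d)]; nlinarith [hr.1, hr.2]
  · rw [if_pos h] at hr
    constructor
    · rw [PySem.Int.le_floordiv_iff_mul_le h]; nlinarith [hr.1, hr.2]
    · rw [PySem.Int.floordiv_lt_iff_lt_mul h]; nlinarith [hr.1, hr.2]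

theorem pvToChars_single {v : Int} (h0 : 0 ≤ v) (h9 : v < 10) :
    ∃ c, PySem.Int.toChars v = [c] := by
  interval_cases v <;> exact ⟨_, rfl⟩

theorem pvDig_single {d r0 : Int} (hd : d ≠ 0) (hr0 : pvInR d r0) (t : Nat) :
    ∃ c, pvDig d r0 t = [c] := by
  obtain ⟨h0, h9⟩ := pvDigit_bounds hd (pvInR_orb hd hr0 t)
  exact pvToChars_single h0 h9

theorem pvDigs_succ (d r0 : Int) (i : Nat) :
    pvDigs d r0 (i+1) = pvDigs d r0 i ++ pvDig d r0 i := by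
  simp [pvDigs, List.range_succ]

theorem pvDigs_len {d r0 : Int} (hd : d ≠ 0) (hr0 : pvInR d r0) (i : Nat) :
    (pvDigs d r0 i).length = i := by
  induction i with
  | zero => simp [pvDigs]
  | succ i ih =>
    obtain ⟨c, hc⟩ := pvDig_single hd hr0 i
    simp [pvDigs_succ, ih, hc]

theorem pvInR_finset {d : Int} (hd : d ≠ 0) :
    ∃ T : Finset Int, T.card = d.natAbs ∧ ∀ r, pvInR d r → r ∈ T := by
  rcases lt_or_gt_of_ne hd with h | h
  · refine ⟨Finset.Ioc d 0, ?_, ?_⟩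
    · rw [Int.card_Ioc]; omega
    · intro r hr; unfold pvInR at hr; rw [if_neg (not_lt.mpr h.le)] at hr
      exact Finset.mem_Ioc.mpr hr
  · refine ⟨Finset.Ico 0 d, ?_, ?_⟩
    · rw [Int.card_Ico]; omega
    · intro r hr; unfold pvInR at hr; rw [if_pos h] at hr
      exact Finset.mem_Ico.mpr hr

theorem pvStop_exists {d r0 : Int} (hd : d ≠ 0) (hr0 : pvInR d r0) :
    ∃ n, n ≤ d.natAbs ∧ pvStop d r0 n := by
  obtain ⟨T, hT, hmem⟩ := pvInR_finset hd
  have hmt : Set.MapsTo (pvOrb d r0) ↑(Finset.range (d.natAbs + 1)) ↑T := by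
    intro i _
    exact hmem _ (pvInR_orb hd hr0 i)
  obtain ⟨x, hx, y, hy, hxy, hfeq⟩ :=
    Finset.exists_ne_map_eq_of_card_lt_of_maps_to (by simp [hT]) hmt
  simp only [Finset.mem_range] at hx hy
  rcases lt_or_gt_of_ne hxy with h | h
  · exact ⟨y, by omega, Or.inr ⟨x, h, hfeq⟩⟩
  · exact ⟨x, by omega, Or.inr ⟨y, h, hfeq.symm⟩⟩

-- port A's loop, fully characterised
theorem pvGoA_eq {d r0 : Int} (N : Nat) (hd : d ≠ 0) (hr0 : pvInR d r0)
    (hN : pvStop d r0 N) (hmin : ∀ m, m < N → ¬ pvStop d r0 m)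
    (J : Nat) (hJ : pvOrb d r0 N ≠ 0 → J < N ∧ pvOrb d r0 J = pvOrb d r0 N) :
    ∀ F i (m : PySem.Dict Int Int) (s : List Char), i ≤ N → N < i + F →
    (∀ t, t < i → m.get? (pvOrb d r0 t) = some (t : Int)) →
    (∀ r', (∀ t, t < i → pvOrb d r0 t ≠ r') → m.get? r' = none) →
    s = pvDigs d r0 i →
    pvGoA d F (pvOrb d r0 i) m s =
      (if pvOrb d r0 N = 0 then none
       else some (String.ofList ((pvDigs d r0 N).drop J))) := by
  intro F
  induction F with
  | zero => intro i m s hiN hfuel _ _ _; omega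
  | succ f ih =>
    intro i m s hiN hfuel hpos habs hs
    by_cases hi : i < N
    · have h0 : pvOrb d r0 i ≠ 0 := fun h => hmin i hi (Or.inl h)
      have hnone : m.get? (pvOrb d r0 i) = none := by
        apply habs
        intro t ht hteq
        exact hmin i hi (Or.inr ⟨t, ht, hteq⟩)
      have hcont : m.contains (pvOrb d r0 i) = false := by
        rw [PySem.Dict.contains_eq_isSome_get?, hnone]; rfl
      rw [pvGoA, if_pos ⟨h0, hcont⟩, ← pvOrb_succ]
      have hlen : PySem.List.len s = ((i : Nat) : Int) := by
        rw [PySem.List.len_eq, hs, pvDigs_len hd hr0]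
      apply ih (i+1) _ _ (by omega) (by omega)
      · intro t ht
        rcases Nat.lt_succ_iff_lt_or_eq.mp ht with ht' | rfl
        · rw [PySem.Dict.get?_insert_of_ne _ _ (fun he => hmin i hi (Or.inr ⟨t, ht', he⟩))]
          exact hpos t ht'
        · rw [hlen, PySem.Dict.get?_insert_self]
      · intro r' hr'
        rw [PySem.Dict.get?_insert_of_ne _ _ (fun he => hr' i (by omega) he.symm)]
        exact habs r' (fun t ht => hr' t (by omega))
      · rw [hs, pvDigs_succ]; rfl
    · have hiN' : i = N := le_antisymm hiN (not_lt.mp hi)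
      subst hiN'
      by_cases h0 : pvOrb d r0 i = 0
      · rw [pvGoA, if_neg (by simp [h0]), pvExitA, if_pos h0, if_pos h0]
      · obtain ⟨hJlt, hJeq⟩ := hJ h0
        have hget : m.get? (pvOrb d r0 i) = some ((J : Nat) : Int) := by
          rw [← hJeq]; exact hpos J hJlt
        have hcont : m.contains (pvOrb d r0 i) = true := by
          rw [PySem.Dict.contains_eq_isSome_get?, hget]; rfl
        rw [pvGoA, if_neg (by simp [hcont]), pvExitA, if_neg h0, if_neg h0]
        have hgetD : m.getD (pvOrb d r0 i) 0 = ((J : Nat) : Int) := by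
          show (m.get? (pvOrb d r0 i)).getD 0 = _
          rw [hget]; rfl
        rw [hgetD, PySem.List.slice_from_natCast, hs]

-- port B's phase-1 loop reaches the same final remainder
theorem pvGoB1_eq {d r0 : Int} (N : Nat)
    (hmin : ∀ m, m < N → ¬ pvStop d r0 m) (hN : pvStop d r0 N) :
    ∀ F i (seen : PySem.Set Int), i ≤ N → N < i + F →
    (∀ r', r' ∈ seen ↔ ∃ t, t < i ∧ pvOrb d r0 t = r') →
    pvGoB1 d F (pvOrb d r0 i) seen = pvOrb d r0 N := by
  intro F
  induction F with
  | zero => intro i seen hiN hfuel _; omega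
  | succ f ih =>
    intro i seen hiN hfuel hseen
    by_cases hi : i < N
    · have h0 : pvOrb d r0 i ≠ 0 := fun h => hmin i hi (Or.inl h)
      have hmem : pvOrb d r0 i ∉ seen := by
        rw [hseen]
        rintro ⟨t, ht, hteq⟩
        exact hmin i hi (Or.inr ⟨t, ht, hteq⟩)
      have hcont : seen.contains (pvOrb d r0 i) = false := by
        simp [hmem]
      rw [pvGoB1, if_pos ⟨h0, hcont⟩, ← pvOrb_succ]
      apply ih (i+1) _ (by omega) (by omega)
      intro r'
      rw [PySem.Set.mem_add, hseen]
      constructor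
      · rintro (⟨t, ht, hteq⟩ | h)
        · exact ⟨t, by omega, hteq⟩
        · exact ⟨i, by omega, h.symm⟩
      · rintro ⟨t, ht, hteq⟩
        rcases Nat.lt_succ_iff_lt_or_eq.mp ht with ht' | rfl
        · exact Or.inl ⟨t, ht', hteq⟩
        · exact Or.inr hteq.symm
    · have hiN' : i = N := le_antisymm hiN (not_lt.mp hi)
      subst hiN'
      rw [pvGoB1]
      rcases hN with h0 | ⟨j, hj, hjeq⟩
      · rw [if_neg (by simp [h0])]
      · have : pvOrb d r0 i ∈ seen := (hseen _).mpr ⟨j, hj, hjeq⟩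
        rw [if_neg (by simp [this])]

-- port B's phase-2 loop emits exactly the digits of steps J, …, N-1
theorem pvGoB2_eq {d r0 : Int} (N : Nat)
    (hmin : ∀ m, m < N → ¬ pvStop d r0 m)
    (J : Nat) (hJlt : J < N) (hJr : pvOrb d r0 J = pvOrb d r0 N) :
    ∀ F t (acc : List (List Char)), t < N - J → N - J ≤ t + F →
    pvGoB2 d (pvOrb d r0 N) F (pvOrb d r0 (J + t)) acc =
      acc ++ (List.range' (J + t) (N - J - t)).map (pvDig d r0) := by
  intro F
  induction F with
  | zero => intro t acc h1 h2; omega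
  | succ f ih =>
    intro t acc ht hfuel
    rw [pvGoB2]
    simp only [← pvOrb_succ]
    have hdig : PySem.Int.toChars (PySem.Int.floordiv (pvOrb d r0 (J + t) * 10) d) =
        pvDig d r0 (J + t) := rfl
    by_cases hrep : pvOrb d r0 (J + t + 1) = pvOrb d r0 N
    · have hend : t + 1 = N - J := by
        by_contra hne
        have hlt : J + t + 1 < N := by omega
        exact hmin (J + t + 1) hlt (Or.inr ⟨J, by omega, hJr.trans hrep.symm⟩)
      rw [if_pos hrep]
      have : N - J - t = 1 := by omega
      rw [this, hdig]
      rfl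
    · have hne : t + 1 ≠ N - J := by
        intro he
        apply hrep
        have : J + t + 1 = N := by omega
        rw [this]
      rw [if_neg hrep]
      have := ih (t + 1) (acc ++ [pvDig d r0 (J + t)]) (by omega) (by omega)
      rw [hdig]
      rw [show J + t + 1 = J + (t + 1) from by omega, this]
      have hr' : N - J - t = (N - J - (t + 1)) + 1 := by omega
      rw [hr', List.range'_succ]
      simp [show J + t + 1 = J + (t + 1) from by omega]

theorem pvJoin_nil_flatten (l : List (List Char)) :
    PySem.Chars.join [] l = l.flatten := by
  induction l with
  | nil => simp [PySem.Chars.join_nil]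
  | cons p rest ih =>
    cases rest with
    | nil => simp [PySem.Chars.join_singleton]
    | cons q r => rw [PySem.Chars.join_cons_cons]; simp_all

-- ===== VERDICT (by name: the statement is the Claim_ definition above) =====
theorem find_recurring_sequence_spec : Claim_equal_find_recurring_sequence := by
  intro n d _ hd
  have hd' : d ≠ 0 := hd
  unfold Spec_find_recurring_sequence
  set r0 := PySem.Int.mod n d with hr0def
  have hr0 : pvInR d r0 := pvInR_mod hd' n
  haveI : DecidablePred (pvStop d r0) := fun _ => Classical.dec _
  obtain ⟨M, hMle, hstopM⟩ := pvStop_exists hd' hr0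
  have hex : ∃ k, pvStop d r0 k := ⟨M, hstopM⟩
  set N := Nat.find hex with hNdef
  have hN : pvStop d r0 N := Nat.find_spec hex
  have hmin : ∀ m, m < N → ¬ pvStop d r0 m := fun m hm => Nat.find_min hex hm
  have hNle : N ≤ d.natAbs := le_trans (Nat.find_min' hex hstopM) hMle
  -- the index J where the repeating remainder first occurred (any value in the 0 case)
  obtain ⟨J, hJ⟩ : ∃ J, pvOrb d r0 N ≠ 0 → J < N ∧ pvOrb d r0 J = pvOrb d r0 N := by
    by_cases h0 : pvOrb d r0 N = 0
    · exact ⟨0, fun hc => absurd h0 hc⟩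
    · obtain ⟨j, hj, hjeq⟩ := hN.resolve_left h0
      exact ⟨j, fun _ => ⟨hj, hjeq⟩⟩
  -- port A's value
  have hA : find_recurring_sequence n d =
      (if pvOrb d r0 N = 0 then none
       else some (String.ofList ((pvDigs d r0 N).drop J))) := by
    have := pvGoA_eq N hd' hr0 hN hmin J hJ (d.natAbs + 1) 0 PySem.Dict.empty []
      (by omega) (by omega)
      (by intro t ht; omega)
      (by intro r' _; exact PySem.Dict.get?_empty r')
      (by simp [pvDigs])
    exact this
  -- port B's phase 1
  have hB1 : pvGoB1 d (d.natAbs + 1) r0 PySem.Set.empty = pvOrb d r0 N := by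
    have := pvGoB1_eq N hmin hN (d.natAbs + 1) 0 PySem.Set.empty
      (by omega) (by omega)
      (by intro r'; constructor
          · intro h; exact absurd h (List.not_mem_nil)
          · rintro ⟨t, ht, _⟩; omega)
    exact this
  rw [hA]
  show _ = (if pvGoB1 d (d.natAbs + 1) r0 PySem.Set.empty = 0 then none
    else some (String.ofList (PySem.Chars.join []
      (pvGoB2 d (pvGoB1 d (d.natAbs + 1) r0 PySem.Set.empty) (d.natAbs + 1)
        (pvGoB1 d (d.natAbs + 1) r0 PySem.Set.empty) []))))
  rw [hB1]
  by_cases h0 : pvOrb d r0 N = 0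
  · rw [if_pos h0, if_pos h0]
  · obtain ⟨hJlt, hJeq⟩ := hJ h0
    rw [if_neg h0, if_neg h0]
    -- phase 2 produces the digits of steps J, …, N-1
    have hB2 : pvGoB2 d (pvOrb d r0 N) (d.natAbs + 1) (pvOrb d r0 N) [] =
        (List.range' J (N - J)).map (pvDig d r0) := by
      have := pvGoB2_eq N hmin J hJlt hJeq (d.natAbs + 1) 0 []
        (by omega) (by omega)
      simpa [hJeq] using this
    rw [hB2, pvJoin_nil_flatten, ← List.flatMap_def]
    -- and A's suffix is the same digit block
    have hsplit : List.range N = List.range J ++ List.range' J (N - J) := by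
      rw [List.range_eq_range', List.range_eq_range']
      calc List.range' 0 N = List.range' 0 (J + (N - J)) := by
            rw [show J + (N - J) = N from by omega]
        _ = List.range' 0 J ++ List.range' (0 + 1 * J) (N - J) := (List.range'_append).symm
        _ = List.range' 0 J ++ List.range' J (N - J) := by norm_num
    have hdigs : pvDigs d r0 N =
        pvDigs d r0 J ++ (List.range' J (N - J)).flatMap (pvDig d r0) := by
      rw [pvDigs, hsplit, List.flatMap_append]; rfl
    rw [hdigs, List.drop_left' (pvDigs_len hd' hr0 J)]
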